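-- pv_equiv track=rewrite | github.com/bordaigorl/remy | remy/remarkable/export.py | validatePageRanges
-- ===== SOURCE A (Python) =====
-- def _pageint(i):
--   i = int(i)
--   return (i if i < 0 else i-1)
--
-- def parsePageRange(s):
--   s = [i.strip() for i in s.split(':')]
--   if len(s) > 3:
--     raise Exception("Could not parse page range")
--   r = []
--   if len(s) == 1:
--     if len(s[0]) == 0:
--       return [None]
--     i = -1 if s[0] == "end" or len(s[0]) == 0 else _pageint(s[0])
--     j = None if i == -1 else i+1
--     return [i, j]
--   for i in range(3):
--     if i >= len(s):
--       r.append(None)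
--     elif s[i] == "end" or len(s[i]) == 0:
--       r.append(-1 if i == 0 else None)
--     elif i < 2:
--       r.append(_pageint(s[i]))
--     else:
--       r.append(int(s[i]))
--   return r
--
-- def validatePageRanges(whichPages):
--   try:
--     if whichPages.strip() == "marked":
--       return True
--     for s in whichPages.split(','):
--       parsePageRange(s)
--     return True
--   except:
--     return False
-- ===== SOURCE B (Python) =====
-- def _partOk(part):
--   p = part.strip()
--   if p == "" or p == "end":
--     return True
--   try:
--     int(p)
--     return True
--   except ValueError:
--     return False
--
-- def _segmentOk(segment):
--   parts = segment.split(':')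
--   return len(parts) <= 3 and all(_partOk(p) for p in parts)
--
-- def validatePageRanges(whichPages):
--   if whichPages.strip() == "marked":
--     return True
--   return all(_segmentOk(seg) for seg in whichPages.split(','))
-- ===== Notes on version B (the rewrite author's own statement) =====
-- stated objective: simpler
-- what changed: A validates by running the exception-driven range parser (per-position branching, _pageint/int arithmetic, building result lists) and catching any exception; B directly tests the comma/colon grammar with a single boolean predicate per part (empty, 'end', or parseable int) and a length<=3 check, with no range construction or exception-based control flow.
import Mathlib
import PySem

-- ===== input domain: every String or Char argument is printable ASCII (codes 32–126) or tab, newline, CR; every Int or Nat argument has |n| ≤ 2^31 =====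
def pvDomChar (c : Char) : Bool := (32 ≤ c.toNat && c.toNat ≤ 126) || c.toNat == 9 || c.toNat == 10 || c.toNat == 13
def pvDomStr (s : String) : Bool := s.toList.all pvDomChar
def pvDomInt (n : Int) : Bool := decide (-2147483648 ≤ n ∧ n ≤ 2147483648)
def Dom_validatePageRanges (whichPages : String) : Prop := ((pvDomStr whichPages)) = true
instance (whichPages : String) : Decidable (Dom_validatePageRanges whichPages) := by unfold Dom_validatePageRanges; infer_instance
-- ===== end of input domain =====

-- B replaces A's exception-driven construction of page-range lists by a direct boolean predicate
-- over the comma/colon grammar (objective: simpler).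

-- s.split(sep) for a NONEMPTY literal sep (split? is none exactly for sep = "")
def pySplit (s sep : String) : List String := (PySem.Str.split? s sep).getD []

-- ===== PORT A =====
-- _pageint(i): int() may raise ValueError → Option
def pageint? (i : String) : Option Int :=
  match PySem.Int.ofStr? i with
  | none => none
  | some n => some (if n < 0 then n else n - 1)

-- body of parsePageRange's 'for i in range(3)' loop (acc = none once an int() has raised)
def prBody (parts : List String) (acc : Option (List (Option Int))) (i : Nat) : Option (List (Option Int)) :=
  match acc with
  | none => none
  | some r =>
    if i ≥ parts.length then some (r ++ [none])
    else
      let si := parts.getD i ""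
      if si = "end" ∨ PySem.Str.len si = 0 then
        some (r ++ [if i = 0 then some (-1 : Int) else none])
      else if i < 2 then
        match pageint? si with
        | none => none
        | some v => some (r ++ [some v])
      else
        match PySem.Int.ofStr? si with
        | none => none
        | some v => some (r ++ [some v])

-- parsePageRange(s): none = the exception (more than 3 parts, or int() raising)
def parsePageRange? (s : String) : Option (List (Option Int)) :=
  let parts := (pySplit s ":").map PySem.Str.strip
  if parts.length > 3 then none
  else if parts.length = 1 then
    let s0 := parts.getD 0 ""
    if PySem.Str.len s0 = 0 then some [none]
    else
      match (if s0 = "end" ∨ PySem.Str.len s0 = 0 then some (-1 : Int) else pageint? s0) with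
      | none => none
      | some i => some [some i, if i = -1 then none else some (i + 1)]
  else
    (List.range 3).foldl (prBody parts) (some [])

def validatePageRanges (whichPages : String) : Bool :=
  if PySem.Str.strip whichPages = "marked" then true
  else (pySplit whichPages ",").all (fun s => (parsePageRange? s).isSome)

-- ===== PORT B =====
def partOk (part : String) : Bool :=
  let p := PySem.Str.strip part
  if p = "" ∨ p = "end" then true
  else (PySem.Int.ofStr? p).isSome

def segmentOk (segment : String) : Bool :=
  let parts := pySplit segment ":"
  decide (parts.length ≤ 3) && parts.all partOk

def validatePageRanges_alt (whichPages : String) : Bool :=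
  if PySem.Str.strip whichPages = "marked" then true
  else (pySplit whichPages ",").all segmentOk

-- ===== PRECONDITION & SPEC =====
def Spec_validatePageRanges (whichPages : String) (out : Bool) : Prop := out = validatePageRanges_alt whichPages
instance (whichPages : String) (out : Bool) : Decidable (Spec_validatePageRanges whichPages out) := by unfold Spec_validatePageRanges; infer_instance

-- ===== CLAIM (what is proved, stated in full; the proofs are below) =====
def Claim_equal_validatePageRanges : Prop := ∀ (whichPages : String), Dom_validatePageRanges whichPages → Spec_validatePageRanges whichPages (validatePageRanges whichPages)

-- ===== LEMMAS AND PROOFS =====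

-- B's per-part test on an already-stripped part
def bpred (p : String) : Bool := if p = "" ∨ p = "end" then true else (PySem.Int.ofStr? p).isSome

lemma keyw (s : String) : (s = "end" ∨ PySem.Str.len s = 0) ↔ (s = "" ∨ s = "end") := by
  simp [PySem.Str.len, or_comm]

lemma prBody_isSome (parts : List String) (acc : Option (List (Option Int))) (i : Nat) :
    (prBody parts acc i).isSome
      = (acc.isSome && (if i ≥ parts.length then true else bpred (parts.getD i ""))) := by
  cases acc with
  | none => simp [prBody]
  | some r =>
    show (prBody parts (some r) i).isSome = _
    unfold prBody
    generalize parts.getD i "" = p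
    by_cases hlen : i ≥ parts.length
    · simp [hlen]
    · by_cases hk : (p = "end" ∨ PySem.Str.len p = 0)
      · rcases (keyw p).mp hk with h | h <;> simp [hlen, h, bpred]
      · have hk' : ¬ (p = "" ∨ p = "end") := fun h => hk ((keyw _).mpr h)
        push Not at hk'
        by_cases h2 : i < 2 <;>
          cases g : PySem.Int.ofStr? p <;>
          simp [hlen, hk'.1, hk'.2, h2, g, bpred, pageint?]

-- A's parse of a list of (already stripped) parts succeeds iff there are at most three parts
-- and each is empty, "end", or an int literal
lemma core (L : List String) :
    (if L.length > 3 then (none : Option (List (Option Int)))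
     else if L.length = 1 then
        let s0 := L.getD 0 ""
        if PySem.Str.len s0 = 0 then some [none]
        else
          match (if s0 = "end" ∨ PySem.Str.len s0 = 0 then some (-1 : Int) else pageint? s0) with
          | none => none
          | some i => some [some i, if i = -1 then none else some (i + 1)]
     else
        (List.range 3).foldl (prBody L) (some [])).isSome
    = (decide (L.length ≤ 3) && L.all bpred) := by
  have hr : List.range 3 = [0,1,2] := rfl
  match L with
  | [a] =>
    simp only [List.length, List.getD, List.all]
    by_cases h1 : (a = "end" ∨ PySem.Str.len a = 0)
    · rcases (keyw a).mp h1 with h | h <;> simp [h, bpred, PySem.Str.len]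
    · have h2 : ¬ (a = "" ∨ a = "end") := fun h => h1 ((keyw a).mpr h)
      push Not at h2
      cases g : PySem.Int.ofStr? a <;>
        simp [h2.1, h2.2, g, bpred, pageint?, PySem.Str.len]
  | [] => decide
  | [a, b] =>
    rw [hr]
    simp [List.foldl, prBody_isSome, bpred]
  | [a, b, c] =>
    rw [hr]
    simp [List.foldl, prBody_isSome, bpred, Bool.and_assoc]
  | a :: b :: c :: d :: rest => simp

lemma seg_eq (s : String) : (parsePageRange? s).isSome = segmentOk s := by
  unfold parsePageRange? segmentOk
  rw [core]
  have hp : partOk = fun p => bpred (PySem.Str.strip p) := rfl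
  rw [hp]
  simp [List.all_map, Function.comp_def, bpred]

-- ===== VERDICT (by name: the statement is the Claim_ definition above) =====
theorem validatePageRanges_spec : Claim_equal_validatePageRanges := by
  intro w _
  unfold Spec_validatePageRanges validatePageRanges validatePageRanges_alt
  by_cases h : PySem.Str.strip w = "marked" <;> simp [h, seg_eq]
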